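-- pv_equiv track=rewrite | github.com/LucianoPiehl/farmacia | auxiliar.py | procesar_precios
-- ===== SOURCE A (Python) =====
-- def procesar_precios(lista):
--     a = []
--     b = []
--     c = []
--     contador = 0
--     for i in lista:
--         if contador > 11:
--             contador = 0
--         if contador == 8:
--             a.append(i)
--         elif contador == 9:
--             b.append(i)
--         elif contador == 11:
--             c.append(i)
--
--         contador += 1
--     return a, b, c
-- ===== SOURCE B (Python) =====
-- def procesar_precios(lista):
--     a, b, c = [], [], []
--     n = len(lista)
--     start = 0
--     while start < n:
--         block = lista[start:start + 12]
--         a += block[8:9]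
--         b += block[9:10]
--         c += block[11:12]
--         start += 12
--     return a, b, c
-- ===== Notes on version B (the rewrite author's own statement) =====
-- stated objective: alternative
-- what changed: Replaces A's per-element loop with a resetting modular counter and an elif chain by a block-wise loop that jumps ahead 12 positions at a time and extracts the three relevant entries of each 12-block with slices, so there is no counter and no per-element branching.
import Mathlib
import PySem

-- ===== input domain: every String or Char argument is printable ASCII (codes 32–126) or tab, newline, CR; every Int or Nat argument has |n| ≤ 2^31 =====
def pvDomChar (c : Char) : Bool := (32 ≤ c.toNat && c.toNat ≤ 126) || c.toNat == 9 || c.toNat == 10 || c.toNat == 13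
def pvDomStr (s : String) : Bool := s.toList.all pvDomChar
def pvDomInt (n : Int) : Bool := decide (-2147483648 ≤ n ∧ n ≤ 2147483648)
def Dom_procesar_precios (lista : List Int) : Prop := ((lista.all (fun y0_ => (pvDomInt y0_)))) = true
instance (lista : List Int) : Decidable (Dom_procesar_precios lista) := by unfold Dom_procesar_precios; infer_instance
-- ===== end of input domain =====

-- B replaces A's per-element modular-counter loop by a block-wise loop that jumps 12
-- positions at a time and slices the three relevant entries out of each 12-block.


-- ===== PORT A =====
-- one fold over the list carrying (a, b, c, contador); branch order as in A
def pvStepA (s : List Int × List Int × List Int × Int) (i : Int) :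
    List Int × List Int × List Int × Int :=
  let contador := if s.2.2.2 > 11 then 0 else s.2.2.2
  if contador = 8 then (s.1 ++ [i], s.2.1, s.2.2.1, contador + 1)
  else if contador = 9 then (s.1, s.2.1 ++ [i], s.2.2.1, contador + 1)
  else if contador = 11 then (s.1, s.2.1, s.2.2.1 ++ [i], contador + 1)
  else (s.1, s.2.1, s.2.2.1, contador + 1)

def procesar_precios (lista : List Int) : List Int × List Int × List Int :=
  let s := lista.foldl pvStepA ([], [], [], 0)
  (s.1, s.2.1, s.2.2.1)

-- ===== PORT B =====
-- while start < n: block = lista[start:start+12]; a += block[8:9]; b += block[9:10]; c += block[11:12]; start += 12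
def pvLoopB (lista : List Int) (n : Int) (a b c : List Int) (start : Int) :
    List Int × List Int × List Int :=
  if h : start < n then
    let block := PySem.List.slice lista (some start) (some (start + 12))
    pvLoopB lista n
      (a ++ PySem.List.slice block (some 8) (some 9))
      (b ++ PySem.List.slice block (some 9) (some 10))
      (c ++ PySem.List.slice block (some 11) (some 12))
      (start + 12)
  else (a, b, c)
termination_by (n - start).toNat
decreasing_by omega

def procesar_precios_alt (lista : List Int) : List Int × List Int × List Int :=
  pvLoopB lista (lista.length : Int) [] [] [] 0

-- ===== PRECONDITION & SPEC =====
def Spec_procesar_precios (lista : List Int) (out : List Int × List Int × List Int) : Prop := out = procesar_precios_alt lista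
instance (lista : List Int) (out : List Int × List Int × List Int) : Decidable (Spec_procesar_precios lista out) := by unfold Spec_procesar_precios; infer_instance

-- ===== CLAIM =====
def Claim_equal_procesar_precios : Prop := ∀ (lista : List Int), Dom_procesar_precios lista → Spec_procesar_precios lista (procesar_precios lista)

-- ===== LEMMAS AND PROOFS =====

-- elements at running counter e (mod 12) equal to r; characterizes A's fold
def pvSel (e r : Int) : List Int → List Int
  | [] => []
  | x :: xs => (if e = r then [x] else []) ++ pvSel ((e + 1) % 12) r xs

theorem pvFoldA (xs : List Int) : ∀ (a b c : List Int) (n : Int), 0 ≤ n → n ≤ 12 →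
    ∃ m, xs.foldl pvStepA (a, b, c, n) =
      (a ++ pvSel (n % 12) 8 xs, b ++ pvSel (n % 12) 9 xs, c ++ pvSel (n % 12) 11 xs, m) := by
  induction xs with
  | nil => intro a b c n h1 h2; exact ⟨n, by simp [pvSel]⟩
  | cons x xs ih =>
    intro a b c n h1 h2
    have he : (if n > 11 then (0 : Int) else n) = n % 12 := by
      split_ifs with h <;> omega
    have hstep : pvStepA (a, b, c, n) x =
        (if n % 12 = 8 then a ++ [x] else a, if n % 12 = 9 then b ++ [x] else b,
         if n % 12 = 11 then c ++ [x] else c, n % 12 + 1) := by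
      unfold pvStepA
      rw [he]
      split_ifs with h8 h9 h11 <;> simp_all
    obtain ⟨m, hm⟩ := ih (if n % 12 = 8 then a ++ [x] else a)
      (if n % 12 = 9 then b ++ [x] else b) (if n % 12 = 11 then c ++ [x] else c)
      (n % 12 + 1) (by omega) (by omega)
    refine ⟨m, ?_⟩
    rw [List.foldl_cons, hstep, hm]
    simp only [pvSel]
    split_ifs <;> simp_all

-- one 12-block of the selection at counter 0 is a single take-1 at offset r
theorem pvSel_chunk (r : Int) (hr : r = 8 ∨ r = 9 ∨ r = 11) (xs : List Int) :
    pvSel 0 r xs = (xs.drop r.toNat).take 1 ++ pvSel 0 r (xs.drop 12) := by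
  have t8 : ((8:Int)).toNat = 8 := rfl
  have t9 : ((9:Int)).toNat = 9 := rfl
  have t11 : ((11:Int)).toNat = 11 := rfl
  rcases xs with _ | ⟨x0, _ | ⟨x1, _ | ⟨x2, _ | ⟨x3, _ | ⟨x4, _ | ⟨x5, _ | ⟨x6, _ | ⟨x7,
    _ | ⟨x8, _ | ⟨x9, _ | ⟨x10, _ | ⟨x11, xs⟩⟩⟩⟩⟩⟩⟩⟩⟩⟩⟩⟩ <;>
    rcases hr with h | h | h <;> subst h <;> norm_num [pvSel, t8, t9, t11]

-- the block-wise loop computes the same selections, from any starting offset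
theorem pvLoopB_eq (lista : List Int) : ∀ (k s : Nat) (a b c : List Int),
    lista.length - s ≤ k →
    pvLoopB lista (lista.length : Int) a b c (s : Int) =
      (a ++ pvSel 0 8 (lista.drop s), b ++ pvSel 0 9 (lista.drop s),
       c ++ pvSel 0 11 (lista.drop s)) := by
  intro k
  induction k with
  | zero =>
    intro s a b c hk
    have hs : lista.length ≤ s := by omega
    have hnlt : ¬ ((s : Int) < (lista.length : Int)) := by exact_mod_cast Nat.not_lt.mpr hs
    rw [pvLoopB]
    simp [List.drop_eq_nil_of_le hs, pvSel, hnlt]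
  | succ k ih =>
    intro s a b c hk
    by_cases hs : s < lista.length
    · rw [pvLoopB]
      have hlt : (s : Int) < (lista.length : Int) := by exact_mod_cast hs
      simp only [hlt, dif_pos]
      have hb : PySem.List.slice lista (some (s : Int)) (some ((s : Int) + 12)) =
          (lista.drop s).take 12 := by
        have : ((s : Int) + 12) = ((s + 12 : Nat) : Int) := by push_cast; ring
        rw [this, PySem.List.slice_natCast]
        congr 1; omega
      have hsl : ∀ (r r' : Nat), r' = r + 1 → r + 1 ≤ 12 →
          PySem.List.slice ((lista.drop s).take 12) (some (r : Int)) (some (r' : Int)) =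
            ((lista.drop s).drop r).take 1 := by
        intro r r' hr h12
        rw [PySem.List.slice_natCast, List.drop_take]
        have h1 : r' - r = 1 := by omega
        rw [h1]
        rw [List.take_take, min_eq_left (by omega : (1:Nat) ≤ 12 - r)]
      have h8 := hsl 8 9 rfl (by omega)
      have h9 := hsl 9 10 rfl (by omega)
      have h11 := hsl 11 12 rfl (by omega)
      norm_num at h8 h9 h11
      have hcast : (s : Int) + 12 = ((s + 12 : Nat) : Int) := by push_cast; ring
      rw [hb] at *
      simp only [h8, h9, h11, hcast]
      rw [ih (s + 12) _ _ _ (by omega)]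
      have hd : lista.drop (s + 12) = (lista.drop s).drop 12 := by
        rw [List.drop_drop]
      rw [hd,
        pvSel_chunk 8 (by norm_num) (lista.drop s),
        pvSel_chunk 9 (by norm_num) (lista.drop s),
        pvSel_chunk 11 (by norm_num) (lista.drop s)]
      simp [List.append_assoc]
    · rw [pvLoopB]
      have hs' : lista.length ≤ s := by omega
      have hnlt : ¬ ((s : Int) < (lista.length : Int)) := by exact_mod_cast Nat.not_lt.mpr hs'
      simp [List.drop_eq_nil_of_le hs', pvSel, hnlt]

-- ===== VERDICT =====
theorem procesar_precios_spec : Claim_equal_procesar_precios := by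
  intro lista _
  unfold Spec_procesar_precios procesar_precios procesar_precios_alt
  obtain ⟨m, hm⟩ := pvFoldA lista [] [] [] 0 (by norm_num) (by norm_num)
  have hb := pvLoopB_eq lista lista.length 0 [] [] [] (by omega)
  simp only [Nat.cast_zero] at hb
  rw [hb]
  simp [hm]
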